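-- pv_equiv track=rewrite | github.com/rdguerrerom/Fast_Chess_Agent | agent/agent_v2.py | _are_squares_aligned
-- ===== SOURCE A (Python) =====
-- def _are_squares_aligned(start_square: int, end_square: int, direction: int) -> bool:
--     """
--     Check if two squares are aligned in the given direction.
--     Implement using an iterative approach to avoid recursion.
--     """
--     directions = {
--         1: 1,    # Right
--         -1: -1,  # Left
--         7: -9,   # Diagonal up-left
--         9: -7,   # Diagonal up-right
--         -7: 9,   # Diagonal down-right
--         -9: 7,   # Diagonal down-left
--         8: -8,   # Up
--         -8: 8    # Down
--     }
--
--     diff = abs(end_square - start_square)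
--     step = directions.get(direction, 0)
--
--     if step == 0:
--         return False
--
--     # Check if the squares are aligned
--     current_square = start_square + step
--     while 0 <= current_square < 64:
--         if current_square == end_square:
--             return True
--         if abs(current_square - start_square) > diff:
--             break
--         current_square += step
--
--     return False
-- ===== SOURCE B (Python) =====
-- def _are_squares_aligned(start_square: int, end_square: int, direction: int) -> bool:
--     """Arithmetic (loop-free) check that end_square lies on the ray walked by A."""
--     directions = {
--         1: 1, -1: -1, 7: -9, 9: -7, -7: 9, -9: 7, 8: -8, -8: 8
--     }
--     step = directions.get(direction, 0)
--     if step == 0: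
--         return False
--     d = end_square - start_square
--     if d % step != 0 or d // step < 1:
--         return False
--     # the walked squares form a monotone arithmetic progression, so the whole
--     # segment is on the board iff its two endpoints are
--     return 0 <= end_square < 64 and 0 <= start_square + step < 64
-- ===== Notes on version B (the rewrite author's own statement) =====
-- stated objective: simpler
-- what changed: Replaced the square-by-square walking loop with a closed-form arithmetic test: divisibility and floor-quotient of end-start by the step, plus bounds checks on the two endpoints of the monotone walked segment.
import Mathlib
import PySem

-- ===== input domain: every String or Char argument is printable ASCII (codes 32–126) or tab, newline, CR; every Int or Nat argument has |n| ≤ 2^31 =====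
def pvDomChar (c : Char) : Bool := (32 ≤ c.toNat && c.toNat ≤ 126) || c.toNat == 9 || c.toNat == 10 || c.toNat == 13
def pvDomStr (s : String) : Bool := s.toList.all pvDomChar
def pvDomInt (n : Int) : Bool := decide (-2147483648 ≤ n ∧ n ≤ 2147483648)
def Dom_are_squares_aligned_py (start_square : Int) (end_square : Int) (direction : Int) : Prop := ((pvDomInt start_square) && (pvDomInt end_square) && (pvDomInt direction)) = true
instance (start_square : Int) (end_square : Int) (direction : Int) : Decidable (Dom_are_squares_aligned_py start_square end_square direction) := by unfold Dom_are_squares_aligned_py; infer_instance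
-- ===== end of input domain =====

-- B replaces A's square-by-square walking loop with a closed-form divisibility/bounds test (simpler).

-- ===== PORT A =====
-- shared helper: both Source A and Source B contain the same literal dict;
-- directions.get(direction, 0) is ported as case analysis over its keys — exact
def pvDirStep (direction : Int) : Int :=
  if direction = 1 then 1
  else if direction = -1 then -1
  else if direction = 7 then -9
  else if direction = 9 then -7
  else if direction = -7 then 9
  else if direction = -9 then 7
  else if direction = 8 then -8
  else if direction = -8 then 8
  else 0

-- the while loop; fuel 64 only makes the recursion structural (the loop stays inside [0,64)
-- and moves monotonically by step, so it runs at most 64 iterations — proved in pvALoop_char)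
def pvALoop (start_square end_square step : Int) (diff : Nat) : Nat → Int → Bool
  | 0, _ => false
  | fuel+1, current =>
      if 0 ≤ current ∧ current < 64 then
        if current = end_square then true
        else if diff < (current - start_square).natAbs then false
        else pvALoop start_square end_square step diff fuel (current + step)
      else false

def are_squares_aligned_py (start_square : Int) (end_square : Int) (direction : Int) : Bool :=
  let diff := (end_square - start_square).natAbs
  let step := pvDirStep direction
  if step = 0 then false
  else pvALoop start_square end_square step diff 64 (start_square + step)

-- ===== PORT B =====
def are_squares_aligned_py_alt (start_square : Int) (end_square : Int) (direction : Int) : Bool :=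
  let step := pvDirStep direction
  if step = 0 then false
  else
    let d := end_square - start_square
    if PySem.Int.mod d step ≠ 0 ∨ PySem.Int.floordiv d step < 1 then false
    else decide (0 ≤ end_square ∧ end_square < 64 ∧ 0 ≤ start_square + step ∧ start_square + step < 64)

-- ===== PRECONDITION & SPEC =====
def Spec_are_squares_aligned_py (start_square : Int) (end_square : Int) (direction : Int) (out : Bool) : Prop := out = are_squares_aligned_py_alt start_square end_square direction
instance (start_square : Int) (end_square : Int) (direction : Int) (out : Bool) : Decidable (Spec_are_squares_aligned_py start_square end_square direction out) := by unfold Spec_are_squares_aligned_py; infer_instance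

-- ===== CLAIM (what is proved, stated in full; the proofs are below) =====
def Claim_equal_are_squares_aligned_py : Prop := ∀ (start_square : Int) (end_square : Int) (direction : Int), Dom_are_squares_aligned_py start_square end_square direction → Spec_are_squares_aligned_py start_square end_square direction (are_squares_aligned_py start_square end_square direction)

-- ===== LEMMAS AND PROOFS =====

lemma pvDirStep_cases (d : Int) : pvDirStep d = 0 ∨ pvDirStep d = 1 ∨ pvDirStep d = -1 ∨ pvDirStep d = -9 ∨
    pvDirStep d = -7 ∨ pvDirStep d = 9 ∨ pvDirStep d = 7 ∨ pvDirStep d = -8 ∨ pvDirStep d = 8 := by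
  unfold pvDirStep; split_ifs <;> simp

-- loop characterisation: on the ray current = s + i*step the loop answers
-- "end is in range, current is in range, and end lies a nonnegative number of steps ahead"
lemma pvALoop_char (s e step : Int)
    (hst : step = 1 ∨ step = -1 ∨ step = -9 ∨ step = -7 ∨ step = 9 ∨ step = 7 ∨ step = -8 ∨ step = 8) :
    ∀ (fuel : Nat) (current i : Int), 1 ≤ i → current = s + i * step →
    ((0 ≤ current ∧ current < 64) →
      ((0 < step → 64 - current ≤ (fuel : Int)) ∧ (step < 0 → current + 1 ≤ (fuel : Int)))) →
    (pvALoop s e step (e - s).natAbs fuel current = true ↔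
      (0 ≤ e ∧ e < 64 ∧ 0 ≤ current ∧ current < 64 ∧ ∃ m : Int, 0 ≤ m ∧ e = current + m * step)) := by
  intro fuel
  induction fuel with
  | zero =>
      intro current i hi hcur hfuel
      simp only [pvALoop, Bool.false_eq_true, false_iff]
      rintro ⟨_, _, h1, h2, _⟩
      obtain ⟨hp, hn⟩ := hfuel ⟨h1, h2⟩
      rcases hst with rfl|rfl|rfl|rfl|rfl|rfl|rfl|rfl <;> norm_num at hp hn <;> omega
  | succ fuel ih =>
      intro current i hi hcur hfuel
      simp only [pvALoop]
      by_cases hr : 0 ≤ current ∧ current < 64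
      · rw [if_pos hr]
        by_cases hce : current = e
        · subst hce
          exact iff_of_true (by simp) ⟨hr.1, hr.2, hr.1, hr.2, 0, le_refl 0, by ring⟩
        · rw [if_neg hce]
          by_cases hbr : (e - s).natAbs < (current - s).natAbs
          · rw [if_pos hbr]
            simp only [Bool.false_eq_true, false_iff]
            rintro ⟨_, _, _, _, m, hm, heq⟩
            rcases hst with rfl|rfl|rfl|rfl|rfl|rfl|rfl|rfl <;> omega
          · rw [if_neg hbr]
            rw [ih (current + step) (i + 1) (by omega) (by rw [hcur]; ring)
              (by intro hr'
                  obtain ⟨hp, hn⟩ := hfuel hr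
                  rcases hst with rfl|rfl|rfl|rfl|rfl|rfl|rfl|rfl <;>
                    norm_num at hp hn ⊢ <;> omega)]
            constructor
            · rintro ⟨he1, he2, _, _, m, hm, heq⟩
              exact ⟨he1, he2, hr.1, hr.2, m + 1, by omega,
                by rcases hst with rfl|rfl|rfl|rfl|rfl|rfl|rfl|rfl <;> omega⟩
            · rintro ⟨he1, he2, _, _, m, hm, heq⟩
              have hm1 : 1 ≤ m := by
                rcases hst with rfl|rfl|rfl|rfl|rfl|rfl|rfl|rfl <;> omega
              refine ⟨he1, he2, ?_, ?_, m - 1, by omega, ?_⟩ <;>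
                rcases hst with rfl|rfl|rfl|rfl|rfl|rfl|rfl|rfl <;> omega
      · rw [if_neg hr]
        simp only [Bool.false_eq_true, false_iff]
        rintro ⟨_, _, h1, h2, _⟩
        exact hr ⟨h1, h2⟩

lemma exists_step_iff (s e step : Int) (hs : step ≠ 0) :
    (∃ m : Int, 0 ≤ m ∧ e = s + step + m * step) ↔
      (PySem.Int.mod (e - s) step = 0 ∧ 1 ≤ PySem.Int.floordiv (e - s) step) := by
  have hqm := PySem.Int.floordiv_mul_add_mod (e - s) step
  constructor
  · rintro ⟨m, hm, heq⟩
    have hdvd : step ∣ (e - s) := ⟨m + 1, by rw [heq]; ring⟩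
    have hmod : PySem.Int.mod (e - s) step = 0 := (PySem.Int.mod_eq_zero_iff_dvd _ _).2 hdvd
    rw [hmod] at hqm
    have h2 : (m + 1) * step = e - s := by rw [heq]; ring
    have hq' : PySem.Int.floordiv (e - s) step * step = (m + 1) * step := by linarith
    have hq := mul_right_cancel₀ hs hq'
    exact ⟨hmod, by omega⟩
  · rintro ⟨hmod, hq⟩
    rw [hmod] at hqm
    refine ⟨PySem.Int.floordiv (e - s) step - 1, by omega, ?_⟩
    have h1 : PySem.Int.floordiv (e - s) step * step = e - s := by linarith
    have h2 : (PySem.Int.floordiv (e - s) step - 1) * step =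
        PySem.Int.floordiv (e - s) step * step - step := by ring
    linarith

-- ===== VERDICT (by name: the statement is the Claim_ definition above) =====
theorem are_squares_aligned_py_spec : Claim_equal_are_squares_aligned_py := by
  intro s e d _
  unfold Spec_are_squares_aligned_py are_squares_aligned_py are_squares_aligned_py_alt
  rcases eq_or_ne (pvDirStep d) 0 with h0 | h0
  · simp [h0]
  · have hst : pvDirStep d = 1 ∨ pvDirStep d = -1 ∨ pvDirStep d = -9 ∨ pvDirStep d = -7 ∨
        pvDirStep d = 9 ∨ pvDirStep d = 7 ∨ pvDirStep d = -8 ∨ pvDirStep d = 8 := by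
      rcases pvDirStep_cases d with h|h|h|h|h|h|h|h|h
      · exact absurd h h0
      all_goals simp [h]
    simp only [if_neg h0]
    rw [Bool.eq_iff_iff]
    rw [pvALoop_char s e (pvDirStep d) hst 64 (s + pvDirStep d) 1 (le_refl 1) (by ring)
      (by intro hr
          rcases hst with h|h|h|h|h|h|h|h <;> rw [h] at hr ⊢ <;>
            norm_num <;> omega)]
    rw [exists_step_iff s e (pvDirStep d) h0] at *
    constructor
    · rintro ⟨he1, he2, hc1, hc2, hex⟩
      rw [if_neg (by simp only [not_or, ne_eq, not_not, not_lt]; exact ⟨hex.1, hex.2⟩)]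
      simp [he1, he2, hc1, hc2]
    · intro hb
      by_cases hcond : PySem.Int.mod (e - s) (pvDirStep d) ≠ 0 ∨ PySem.Int.floordiv (e - s) (pvDirStep d) < 1
      · rw [if_pos hcond] at hb; exact absurd hb (by simp)
      · rw [if_neg hcond] at hb
        simp only [not_or, ne_eq, not_not, not_lt] at hcond
        simp only [decide_eq_true_eq] at hb
        exact ⟨hb.1, hb.2.1, hb.2.2.1, hb.2.2.2, hcond.1, hcond.2⟩
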